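-- pv_equiv track=rewrite | github.com/miscreantmee/FACE-RECOGNITION-PROJECT | common.py | merge_sublists
-- ===== SOURCE A (Python) =====
-- def merge_sublists(sublists):
--     sublists = [sorted(list(map(int, sublist))) for sublist in sublists]
--
--     result = []
--     while sublists:
--         curr = sublists.pop()
--         overlap = [sub for sub in sublists if set(curr) & set(sub)]
--         for sub in overlap:
--             sublists.remove(sub)
--             curr = list(set(curr) | set(sub))
--         result.append(sorted(curr))
--
--     merged = {}
--     for sublist in result:
--         key = tuple(sublist)
--         if key not in merged:
--             merged[key] = sublist
--     return list(merged.values())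
-- ===== SOURCE B (Python) =====
-- def merge_sublists(sublists):
--     subs = [sorted(map(int, sub)) for sub in sublists]
--     # inverted index: element value -> indices of sublists containing it
--     index = {}
--     for i, s in enumerate(subs):
--         for v in s:
--             index.setdefault(v, []).append(i)
--     n = len(subs)
--     visited = [False] * n
--     result = []
--     for i in range(n - 1, -1, -1):
--         if visited[i]:
--             continue
--         visited[i] = True
--         merged_js = []
--         for v in subs[i]:
--             for j in index[v]:
--                 if not visited[j]:
--                     visited[j] = True
--                     merged_js.append(j)
--         if merged_js:
--             curr = set(subs[i])
--             for j in merged_js: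
--                 curr.update(subs[j])
--             result.append(sorted(curr))
--         else:
--             result.append(subs[i])  # no overlap: duplicates survive, as in the task's behaviour
--     merged = {}
--     for s in result:
--         merged.setdefault(tuple(s), s)
--     return list(merged.values())
-- ===== Notes on version B (the rewrite author's own statement) =====
-- stated objective: faster
-- what changed: Replaces the pop/scan/remove while-loop (which rescans and mutates the remaining list for every popped sublist) by a one-pass inverted index from element value to sublist indices plus a visited array scanned from the last index down, so overlapping sublists are found by dictionary lookup instead of scanning all remaining sublists and removing them by value.
import Mathlib
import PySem

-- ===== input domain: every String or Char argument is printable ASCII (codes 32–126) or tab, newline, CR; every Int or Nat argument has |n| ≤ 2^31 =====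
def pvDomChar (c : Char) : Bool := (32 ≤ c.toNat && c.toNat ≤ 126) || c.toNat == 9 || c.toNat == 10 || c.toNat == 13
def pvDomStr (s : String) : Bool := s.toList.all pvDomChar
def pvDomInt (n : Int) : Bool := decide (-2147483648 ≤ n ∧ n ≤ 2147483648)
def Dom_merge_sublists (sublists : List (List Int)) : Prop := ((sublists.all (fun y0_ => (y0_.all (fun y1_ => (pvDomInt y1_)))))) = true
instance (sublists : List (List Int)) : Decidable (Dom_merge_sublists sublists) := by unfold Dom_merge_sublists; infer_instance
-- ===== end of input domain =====

-- B replaces A's quadratic pop/scan/remove while-loop by an inverted index (value -> sublist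
-- indices) with a visited array scanned from the last index down; objective: faster.

-- ===== PORT A =====
-- truthiness of `set(curr) & set(sub)`
def pvHasOverlap (curr sub : List Int) : Bool :=
  !(PySem.Set.inter (PySem.Set.ofList curr) (PySem.Set.ofList sub)).isEmpty

-- length bound for the `for sub in overlap: sublists.remove(sub); curr = list(set(curr)|set(sub))`
-- fold (cited by pvLoopA's decreasing_by)
theorem pvFoldRemoveLen (l : List (List Int)) : ∀ (acc : List (List Int)) (curr : List Int),
    ((l.foldl (fun st sub =>
      ((PySem.List.remove? st.1 sub).getD st.1,
        PySem.Set.union (PySem.Set.ofList st.2) sub)) (acc, curr)).1).length ≤ acc.length := by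
  induction l with
  | nil => intro acc curr; simp
  | cons x t ih =>
      intro acc curr
      refine le_trans (ih _ _) ?_
      rcases h : PySem.List.remove? acc x with _ | r
      · simp
      · have hx : x ∈ acc := by
          by_contra hx
          rw [(PySem.List.remove?_eq_none_iff acc x).2 hx] at h; cases h
        rw [PySem.List.remove?_eq_some_erase (xs := acc) (v := x) hx] at h
        cases h
        simpa using List.length_erase_le

-- the `while sublists:` loop of A: pop last, collect overlap, remove+union, append sorted
def pvLoopA (subs : List (List Int)) : List (List Int) :=
  if h : subs = [] then []
  else
    let curr := subs.getLast h
    let rest := subs.dropLast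
    let overlap := rest.filter (pvHasOverlap curr)
    let st := overlap.foldl (fun st sub =>
      ((PySem.List.remove? st.1 sub).getD st.1,
        PySem.Set.union (PySem.Set.ofList st.2) sub)) (rest, curr)
    PySem.List.sorted st.2 (fun x => x) false :: pvLoopA st.1
termination_by subs.length
decreasing_by
  refine lt_of_le_of_lt (pvFoldRemoveLen _ subs.dropLast (subs.getLast h)) ?_
  have hp : 0 < subs.length := List.length_pos_of_ne_nil h
  simp [List.length_dropLast]; omega

def merge_sublists (sublists : List (List Int)) : List (List Int) :=
  let subs := sublists.map (fun sub => PySem.List.sorted (sub.map (fun x => x)) (fun x => x) false)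
  let result := pvLoopA subs
  (result.foldl (fun (d : PySem.Dict (List Int) (List Int)) s =>
      if d.contains s then d else d.insert s s) PySem.Dict.empty).values

-- ===== PORT B =====
-- `for i, s in enumerate(subs): for v in s: index.setdefault(v, []).append(i)`
def pvBuildIndexAux : List (List Int) → Nat → PySem.Dict Int (List Nat) → PySem.Dict Int (List Nat)
  | [], _, d => d
  | s :: rest, i, d =>
      pvBuildIndexAux rest (i + 1) (s.foldl (fun d v => d.insert v (d.getD v [] ++ [i])) d)

def pvBuildIndex (subs : List (List Int)) : PySem.Dict Int (List Nat) :=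
  pvBuildIndexAux subs 0 PySem.Dict.empty

-- loop body of `if not visited[j]: visited[j] = True; merged_js.append(j)`
def pvMark (st : List Bool × List Nat) (j : Nat) : List Bool × List Nat :=
  if st.1.getD j false then st else (st.1.set j true, st.2 ++ [j])

-- `for v in subs[i]: for j in index[v]: …` collecting merged_js
def pvCollect (index : PySem.Dict Int (List Nat)) (visited : List Bool) (vals : List Int) :
    List Bool × List Nat :=
  vals.foldl (fun st v => (index.getD v []).foldl pvMark st) (visited, [])

-- `for i in range(n-1, -1, -1): …` as a countdown recursion; k = i+1
def pvLoopB (subs : List (List Int)) (index : PySem.Dict Int (List Nat)) :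
    List Bool → Nat → List (List Int)
  | _, 0 => []
  | visited, k + 1 =>
      if visited.getD k false then pvLoopB subs index visited k
      else
        let s := subs.getD k []
        let visited1 := visited.set k true
        let st := pvCollect index visited1 s
        let entry :=
          if st.2 = [] then s
          else PySem.List.sorted
            (st.2.foldl (fun c j => PySem.Set.update c (subs.getD j [])) (PySem.Set.ofList s))
            (fun x => x) false
        entry :: pvLoopB subs index st.1 k

def merge_sublists_alt (sublists : List (List Int)) : List (List Int) :=
  let subs := sublists.map (fun sub => PySem.List.sorted (sub.map (fun x => x)) (fun x => x) false)
  let index := pvBuildIndex subs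
  let result := pvLoopB subs index (List.replicate subs.length false) subs.length
  (result.foldl (fun (d : PySem.Dict (List Int) (List Int)) s =>
      if d.contains s then d else d.insert s s) PySem.Dict.empty).values

-- ===== PRECONDITION & SPEC =====
def Spec_merge_sublists (sublists : List (List Int)) (out : List (List Int)) : Prop := out = merge_sublists_alt sublists
instance (sublists : List (List Int)) (out : List (List Int)) : Decidable (Spec_merge_sublists sublists out) := by unfold Spec_merge_sublists; infer_instance

-- ===== CLAIM (what is proved, stated in full; the proofs are below) =====
def Claim_equal_merge_sublists : Prop := ∀ (sublists : List (List Int)), Dom_merge_sublists sublists → Spec_merge_sublists sublists (merge_sublists sublists)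

-- ===== LEMMAS AND PROOFS =====

def pvAlive (subs : List (List Int)) (visited : List Bool) (k : Nat) : List (List Int) :=
  (((List.range k).filter (fun j => !(visited.getD j false))).map (fun j => subs.getD j []))

theorem pvFoldPair {α β γ : Type} (l : List α) (f : β → α → β) (g : γ → α → γ) (b : β) (c : γ) :
    l.foldl (fun st x => (f st.1 x, g st.2 x)) (b, c) = (l.foldl f b, l.foldl g c) := by
  induction l generalizing b c with
  | nil => rfl
  | cons x t ih => simpa using ih (f b x) (g c x)

theorem pvGetDSetSelf (l : List Bool) (i : Nat) (h : i < l.length) :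
    (l.set i true).getD i false = true := by
  simp [List.getD_eq_getElem?_getD, h]

theorem pvGetDSetNe (l : List Bool) (i j : Nat) (h : j ≠ i) :
    (l.set i true).getD j false = l.getD j false := by
  simp [List.getD_eq_getElem?_getD, List.getElem?_set_ne (by omega : i ≠ j)]

theorem pvHasOverlap_iff (curr sub : List Int) :
    pvHasOverlap curr sub = true ↔ ∃ v, v ∈ curr ∧ v ∈ sub := by
  unfold pvHasOverlap
  rw [Bool.not_eq_eq_eq_not]
  simp only [Bool.not_true, List.isEmpty_eq_false_iff]
  constructor
  · intro h
    rcases List.exists_mem_of_ne_nil _ h with ⟨x, hx⟩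
    exact ⟨x, by simpa [PySem.Set.mem_inter, PySem.Set.mem_ofList] using hx⟩
  · rintro ⟨v, hv1, hv2⟩ hnil
    have : v ∈ PySem.Set.inter (PySem.Set.ofList curr) (PySem.Set.ofList sub) := by
      simp [PySem.Set.mem_inter, PySem.Set.mem_ofList, hv1, hv2]
    simp [hnil] at this

-- the remove-fold of A removes exactly the filtered elements
theorem pvRemoveFoldCons (p : List Int → Bool) (x : List Int) (hx : p x = false) :
    ∀ (m : List (List Int)), (∀ s ∈ m, p s = true) → ∀ acc,
      m.foldl (fun acc s => (PySem.List.remove? acc s).getD acc) (x :: acc)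
        = x :: m.foldl (fun acc s => (PySem.List.remove? acc s).getD acc) acc := by
  intro m
  induction m with
  | nil => intro _ acc; rfl
  | cons s t ih =>
      intro hm acc
      have hs : p s = true := hm s (by simp)
      have hne : x ≠ s := by intro h; rw [h, hs] at hx; cases hx
      have hstep : (PySem.List.remove? (x :: acc) s).getD (x :: acc)
          = x :: (PySem.List.remove? acc s).getD acc := by
        rw [PySem.List.remove?_cons_of_ne acc hne]
        rcases h : PySem.List.remove? acc s with _ | r <;> simp [h]
      simp only [List.foldl_cons, hstep]
      exact ih (fun s hs => hm s (by simp [hs])) _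

theorem pvRemoveFilter (p : List Int → Bool) : ∀ l : List (List Int),
    (l.filter p).foldl (fun acc s => (PySem.List.remove? acc s).getD acc) l
      = l.filter (fun s => !(p s)) := by
  intro l
  induction l with
  | nil => rfl
  | cons x t ih =>
      by_cases hx : p x = true
      · simp only [List.filter_cons_of_pos hx, List.foldl_cons,
          PySem.List.remove?_cons_self, Option.getD_some]
        rw [ih]
        simp [hx]
      · have hx' : p x = false := by simpa using hx
        rw [List.filter_cons_of_neg (by simp [hx']),
          pvRemoveFoldCons p x hx' _ (by intro s hs; exact (List.mem_filter.1 hs).2) t, ih]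
        simp [hx']

-- inverted-index characterization
theorem pvIndexInnerMem (i : Nat) (w : Int) (x : Nat) : ∀ (s : List Int) (d : PySem.Dict Int (List Nat)),
    x ∈ (s.foldl (fun d v => d.insert v (d.getD v [] ++ [i])) d).getD w []
      ↔ x ∈ d.getD w [] ∨ (w ∈ s ∧ x = i) := by
  intro s
  induction s with
  | nil => intro d; simp
  | cons v t ih =>
      intro d
      rw [List.foldl_cons, ih]
      rw [PySem.Dict.getD_insert]
      by_cases hw : w = v <;> simp [hw] <;> tauto

theorem pvIndexAuxMem (w : Int) (x : Nat) : ∀ (l : List (List Int)) (i : Nat) (d : PySem.Dict Int (List Nat)),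
    x ∈ (pvBuildIndexAux l i d).getD w []
      ↔ x ∈ d.getD w [] ∨ ∃ idx, idx < l.length ∧ w ∈ l.getD idx [] ∧ x = i + idx := by
  intro l
  induction l with
  | nil => intro i d; simp [pvBuildIndexAux]
  | cons s t ih =>
      intro i d
      rw [pvBuildIndexAux, ih, pvIndexInnerMem]
      constructor
      · rintro (((h | ⟨hw, hx⟩) | ⟨idx, hidx, hw, hx⟩))
        · exact Or.inl h
        · exact Or.inr ⟨0, by simpa [hx]⟩
        · refine Or.inr ⟨idx + 1, ?_, ?_, ?_⟩
          · simp [hidx]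
          · simpa using hw
          · omega
      · rintro (h | ⟨idx, hidx, hw, hx⟩)
        · exact Or.inl (Or.inl h)
        · cases idx with
          | zero => exact Or.inl (Or.inr ⟨by simpa using hw, by simpa using hx⟩)
          | succ m =>
              refine Or.inr ⟨m, ?_, ?_, ?_⟩
              · simp at hidx; omega
              · simpa using hw
              · omega

theorem pvIndexMem (subs : List (List Int)) (w : Int) (x : Nat) :
    x ∈ (pvBuildIndex subs).getD w [] ↔ x < subs.length ∧ w ∈ subs.getD x [] := by
  rw [pvBuildIndex, pvIndexAuxMem]
  simp only [PySem.Dict.getD_empty, List.not_mem_nil, false_or]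
  constructor
  · rintro ⟨idx, h1, h2, h3⟩; subst h3; simpa using ⟨h1, h2⟩
  · rintro ⟨h1, h2⟩; exact ⟨x, h1, h2, by omega⟩

-- invariant of the visited/merged_js collection loop
def pvInv (v1 : List Bool) (st : List Bool × List Nat) : Prop :=
  st.1.length = v1.length ∧ st.2.Nodup ∧
  (∀ j, st.1.getD j false = (v1.getD j false || decide (j ∈ st.2))) ∧
  (∀ j ∈ st.2, v1.getD j false = false)

theorem pvMark_false (st : List Bool × List Nat) (j : Nat)
    (h : st.1.getD j false = false) : pvMark st j = (st.1.set j true, st.2 ++ [j]) := by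
  simp only [pvMark, h, Bool.false_eq_true, if_false]

theorem pvMark_true (st : List Bool × List Nat) (j : Nat)
    (h : st.1.getD j false = true) : pvMark st j = st := by
  simp only [pvMark, h, if_true]

theorem pvMark_inv (v1 : List Bool) (st : List Bool × List Nat) (j : Nat)
    (hj : j < v1.length) (h : pvInv v1 st) : pvInv v1 (pvMark st j) := by
  obtain ⟨h1, h2, h3, h4⟩ := h
  cases hv : st.1.getD j false with
  | true => rw [pvMark_true st j hv]; exact ⟨h1, h2, h3, h4⟩
  | false =>
    rw [pvMark_false st j hv]
    have hnew : v1.getD j false = false ∧ j ∉ st.2 := by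
      have := h3 j; rw [hv] at this
      rcases Bool.or_eq_false_iff.1 this.symm with ⟨a, b⟩
      exact ⟨a, by intro hm; simp [hm] at b⟩
    refine ⟨by simpa using h1, ?_, ?_, ?_⟩
    · rw [List.nodup_append]
      refine ⟨h2, by simp, ?_⟩
      intro a ha b hb
      simp only [List.mem_singleton] at hb
      subst hb
      intro hab; subst hab; exact hnew.2 ha
    · intro j'
      by_cases hjj : j' = j
      · rw [hjj]
        have hs : (List.set st.1 j true).getD j false = true := pvGetDSetSelf _ _ (by omega)
        simp only [hs, hnew.1]
        simp
      · have : (List.set st.1 j true).getD j' false = st.1.getD j' false := pvGetDSetNe _ _ _ hjj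
        simp only [this, h3 j']
        have hmem : (j' ∈ st.2 ++ [j]) ↔ j' ∈ st.2 := by simp [hjj]
        simp [hmem]
    · intro j' hj'
      rcases List.mem_append.1 hj' with h | h
      · exact h4 j' h
      · simp at h; subst h; exact hnew.1

theorem pvMark_pres_true (st : List Bool × List Nat) (j j' : Nat)
    (h : st.1.getD j' false = true) : (pvMark st j).1.getD j' false = true := by
  cases hv : st.1.getD j false with
  | true => rwa [pvMark_true st j hv]
  | false =>
    rw [pvMark_false st j hv]
    by_cases hjj : j' = j
    · subst hjj; rw [h] at hv; cases hv
    · show (List.set st.1 j true).getD j' false = true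
      rwa [pvGetDSetNe _ _ _ hjj]

theorem pvMark_self_true (st : List Bool × List Nat) (j : Nat) (hj : j < st.1.length) :
    (pvMark st j).1.getD j false = true := by
  cases hv : st.1.getD j false with
  | true => rwa [pvMark_true st j hv]
  | false =>
    rw [pvMark_false st j hv]
    exact pvGetDSetSelf _ _ hj

theorem pvMark_new (st : List Bool × List Nat) (j : Nat) (Q : Nat → Prop)
    (hQ : Q j) (hst : ∀ x ∈ st.2, Q x) : ∀ x ∈ (pvMark st j).2, Q x := by
  intro x hx
  cases hv : st.1.getD j false with
  | true => rw [pvMark_true st j hv] at hx; exact hst x hx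
  | false =>
    rw [pvMark_false st j hv] at hx
    rcases List.mem_append.1 hx with h | h
    · exact hst x h
    · simp at h; subst h; exact hQ

-- inner fold (over one index bucket)
theorem pvFoldMark_inv (v1 : List Bool) (L : List Nat) (hL : ∀ j ∈ L, j < v1.length) :
    ∀ st, pvInv v1 st → pvInv v1 (L.foldl pvMark st) := by
  induction L with
  | nil => intro st h; exact h
  | cons j t ih =>
      intro st h
      exact ih (fun x hx => hL x (by simp [hx])) _ (pvMark_inv v1 st j (hL j (by simp)) h)

theorem pvFoldMark_pres_true (L : List Nat) (j' : Nat) :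
    ∀ st, st.1.getD j' false = true → (L.foldl pvMark st).1.getD j' false = true := by
  induction L with
  | nil => intro st h; exact h
  | cons j t ih => intro st h; exact ih _ (pvMark_pres_true st j j' h)

theorem pvFoldMark_marks (v1 : List Bool) (L : List Nat) (hL : ∀ j ∈ L, j < v1.length) :
    ∀ st, pvInv v1 st → ∀ j ∈ L, (L.foldl pvMark st).1.getD j false = true := by
  induction L with
  | nil => intro st _ j hj; cases hj
  | cons j0 t ih =>
      intro st hinv j hj
      rcases List.mem_cons.1 hj with h | h
      · subst h
        refine pvFoldMark_pres_true t j _ ?_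
        exact pvMark_self_true st j (by rw [hinv.1]; exact hL j (by simp))
      · exact ih (fun x hx => hL x (by simp [hx])) _
          (pvMark_inv v1 st j0 (hL j0 (by simp)) hinv) j h

theorem pvFoldMark_new (L : List Nat) (Q : Nat → Prop) (hQ : ∀ j ∈ L, Q j) :
    ∀ st, (∀ x ∈ st.2, Q x) → ∀ x ∈ (L.foldl pvMark st).2, Q x := by
  induction L with
  | nil => intro st h x hx; exact h x hx
  | cons j t ih =>
      intro st h x hx
      exact ih (fun a ha => hQ a (by simp [ha])) _
        (pvMark_new st j Q (hQ j (by simp)) h) x hx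

-- outer fold (over the values of the popped sublist)
theorem pvCollect_spec (index : PySem.Dict Int (List Nat)) (v1 : List Bool) (s : List Int)
    (hidx : ∀ (v : Int), ∀ j ∈ index.getD v [], j < v1.length) :
    pvInv v1 (pvCollect index v1 s) ∧
    (∀ j, j ∈ (pvCollect index v1 s).2 ↔
      (v1.getD j false = false ∧ ∃ v ∈ s, j ∈ index.getD v [])) := by
  have base : pvInv v1 ((v1, []) : List Bool × List Nat) := by
    refine ⟨rfl, by simp, by simp, by simp⟩
  -- generic facts about the outer fold, by induction on the suffix of s
  have inv : ∀ (l : List Int) (st : List Bool × List Nat), pvInv v1 st →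
      pvInv v1 (l.foldl (fun st v => (index.getD v []).foldl pvMark st) st) := by
    intro l
    induction l with
    | nil => intro st h; exact h
    | cons v t ih => intro st h; exact ih _ (pvFoldMark_inv v1 _ (hidx v) st h)
  have pres : ∀ (l : List Int) (j' : Nat) (st : List Bool × List Nat),
      st.1.getD j' false = true →
      (l.foldl (fun st v => (index.getD v []).foldl pvMark st) st).1.getD j' false = true := by
    intro l
    induction l with
    | nil => intro j' st h; exact h
    | cons v t ih => intro j' st h; exact ih _ _ (pvFoldMark_pres_true _ _ st h)
  have marks : ∀ (l : List Int) (st : List Bool × List Nat), pvInv v1 st →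
      ∀ v ∈ l, ∀ j ∈ index.getD v [],
      (l.foldl (fun st v => (index.getD v []).foldl pvMark st) st).1.getD j false = true := by
    intro l
    induction l with
    | nil => intro st _ v hv; cases hv
    | cons v0 t ih =>
        intro st hinv v hv j hj
        rcases List.mem_cons.1 hv with h | h
        · subst h
          exact pres t j _ (pvFoldMark_marks v1 _ (hidx v) st hinv j hj)
        · exact ih _ (pvFoldMark_inv v1 _ (hidx v0) st hinv) v h j hj
  have news : ∀ (l : List Int) (Q : Nat → Prop), (∀ v ∈ l, ∀ j ∈ index.getD v [], Q j) →
      ∀ (st : List Bool × List Nat), (∀ x ∈ st.2, Q x) →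
      ∀ x ∈ (l.foldl (fun st v => (index.getD v []).foldl pvMark st) st).2, Q x := by
    intro l Q hQ
    induction l with
    | nil => intro st h x hx; exact h x hx
    | cons v t ih =>
        intro st h x hx
        exact ih (fun a ha => hQ a (by simp [ha])) _
          (pvFoldMark_new _ Q (hQ v (by simp)) st h) x hx
  have hinv := inv s _ base
  refine ⟨hinv, ?_⟩
  intro j
  constructor
  · intro hj
    refine ⟨hinv.2.2.2 j hj, ?_⟩
    exact news s (fun x => ∃ v ∈ s, x ∈ index.getD v [])
      (fun v hv x hx => ⟨v, hv, hx⟩) _ (by simp) j hj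
  · rintro ⟨hvj, v, hv, hj⟩
    have htrue := marks s _ base v hv j hj
    have := hinv.2.2.1 j
    rw [htrue] at this
    rcases Bool.or_eq_true_iff.1 this.symm with h | h
    · rw [hvj] at h; cases h
    · simpa using h

theorem pvAlive_succ_visited (subs : List (List Int)) (visited : List Bool) (k : Nat)
    (h : visited.getD k false = true) :
    pvAlive subs visited (k + 1) = pvAlive subs visited k := by
  unfold pvAlive
  rw [List.range_succ, List.filter_append, List.map_append]
  rw [List.getD_eq_getElem?_getD] at h
  simp [h]

theorem pvAlive_succ_unvisited (subs : List (List Int)) (visited : List Bool) (k : Nat)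
    (h : visited.getD k false = false) :
    pvAlive subs visited (k + 1) = pvAlive subs visited k ++ [subs.getD k []] := by
  unfold pvAlive
  rw [List.range_succ, List.filter_append, List.map_append]
  rw [List.getD_eq_getElem?_getD] at h
  simp [h]

theorem pvMemAlive (subs : List (List Int)) (visited : List Bool) (k : Nat) (t : List Int) :
    t ∈ pvAlive subs visited k ↔
      ∃ j, j < k ∧ visited.getD j false = false ∧ t = subs.getD j [] := by
  unfold pvAlive
  simp only [List.mem_map, List.mem_filter, List.mem_range]
  constructor
  · rintro ⟨j, ⟨hj, hv⟩, ht⟩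
    exact ⟨j, hj, by simpa [List.getD_eq_getElem?_getD] using hv, ht.symm⟩
  · rintro ⟨j, hj, hv, ht⟩
    rw [List.getD_eq_getElem?_getD] at hv
    exact ⟨j, ⟨hj, by simp [hv]⟩, ht.symm⟩

-- membership/nodup of the two curr-accumulation folds
theorem pvUnionFoldMem (ov : List (List Int)) (x : Int) :
    ∀ (c0 : List Int), x ∈ ov.foldl (fun c sub => PySem.Set.union (PySem.Set.ofList c) sub) c0
      ↔ x ∈ c0 ∨ ∃ t ∈ ov, x ∈ t := by
  induction ov with
  | nil => intro c0; simp
  | cons s t ih =>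
      intro c0
      rw [List.foldl_cons, ih]
      simp only [PySem.Set.mem_union, PySem.Set.mem_ofList, List.mem_cons]
      constructor
      · rintro ((h | h) | ⟨u, hu, hx⟩)
        · exact Or.inl h
        · exact Or.inr ⟨s, Or.inl rfl, h⟩
        · exact Or.inr ⟨u, Or.inr hu, hx⟩
      · rintro (h | ⟨u, hu | hu, hx⟩)
        · exact Or.inl (Or.inl h)
        · subst hu; exact Or.inl (Or.inr hx)
        · exact Or.inr ⟨u, hu, hx⟩

theorem pvUnionFoldNodup (ov : List (List Int)) (hne : ov ≠ []) :
    ∀ (c0 : List Int),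
      (ov.foldl (fun c sub => PySem.Set.union (PySem.Set.ofList c) sub) c0).Nodup := by
  induction ov with
  | nil => cases hne rfl
  | cons s t ih =>
      intro c0
      rcases t with _ | ⟨u, t'⟩
      · simpa using PySem.Set.nodup_union _ s (PySem.Set.nodup_ofList c0)
      · exact ih (by simp) _

theorem pvUpdateFoldMem (js : List Nat) (subs : List (List Int)) (x : Int) :
    ∀ (c0 : PySem.Set Int),
      x ∈ js.foldl (fun c j => PySem.Set.update c (subs.getD j [])) c0
        ↔ x ∈ c0 ∨ ∃ j ∈ js, x ∈ subs.getD j [] := by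
  induction js with
  | nil => intro c0; simp
  | cons j t ih =>
      intro c0
      rw [List.foldl_cons, ih]
      simp only [PySem.Set.mem_update, List.mem_cons]
      constructor
      · rintro ((h | h) | ⟨u, hu, hx⟩)
        · exact Or.inl h
        · exact Or.inr ⟨j, Or.inl rfl, h⟩
        · exact Or.inr ⟨u, Or.inr hu, hx⟩
      · rintro (h | ⟨u, hu | hu, hx⟩)
        · exact Or.inl (Or.inl h)
        · subst hu; exact Or.inl (Or.inr hx)
        · exact Or.inr ⟨u, hu, hx⟩

theorem pvUpdateFoldNodup (js : List Nat) (subs : List (List Int)) :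
    ∀ (c0 : PySem.Set Int), c0.Nodup →
      (js.foldl (fun c j => PySem.Set.update c (subs.getD j [])) c0).Nodup := by
  induction js with
  | nil => intro c0 h; exact h
  | cons j t ih => intro c0 h; exact ih _ (PySem.Set.nodup_update c0 _ h)

theorem pvMain (subs : List (List Int))
    (Hs : ∀ j, (subs.getD j []).Pairwise (· ≤ ·)) :
    ∀ (k : Nat) (visited : List Bool), k ≤ subs.length → visited.length = subs.length →
    (∀ j, k ≤ j → j < subs.length → visited.getD j false = true) →
    pvLoopB subs (pvBuildIndex subs) visited k = pvLoopA (pvAlive subs visited k) := by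
  intro k
  induction k with
  | zero =>
      intro visited _ _ _
      rw [pvLoopB]
      rw [pvLoopA]
      simp [pvAlive]
  | succ k ih =>
      intro visited hk hlen hvis
      cases hv : visited.getD k false with
      | true =>
          rw [pvLoopB]
          simp only [hv, if_true]
          rw [pvAlive_succ_visited subs visited k hv]
          refine ih visited (by omega) hlen ?_
          intro j h1 h2
          rcases Nat.eq_or_lt_of_le h1 with h | h
          · subst h; exact hv
          · exact hvis j (by omega) h2
      | false =>
          have hk1 : k < subs.length := by omega
          rw [pvLoopB]
          simp only [hv, Bool.false_eq_true, if_false]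
          set s := subs.getD k [] with hs_def
          set v1 := visited.set k true with hv1_def
          set index := pvBuildIndex subs with hindex_def
          have hidx : ∀ (v : Int), ∀ j ∈ index.getD v [], j < v1.length := by
            intro v j hj
            have := (pvIndexMem subs v j).1 hj
            rw [hv1_def, List.length_set, hlen]
            exact this.1
          obtain ⟨hinv, hmem⟩ := pvCollect_spec index v1 s hidx
          set stc := pvCollect index v1 s with hstc_def
          have hv1k : v1.getD k false = true := pvGetDSetSelf _ _ (by omega)
          -- characterize merged_js
          have hjs : ∀ j, j ∈ stc.2 ↔
              j < k ∧ visited.getD j false = false ∧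
                pvHasOverlap s (subs.getD j []) = true := by
            intro j
            rw [hmem j]
            constructor
            · rintro ⟨hvj, v, hvs, hjidx⟩
              have hlt := (pvIndexMem subs v j).1 hjidx
              have hjk : j ≠ k := by
                intro e; rw [e, hv1k] at hvj; cases hvj
              have hvisj : visited.getD j false = false := by
                rwa [hv1_def, pvGetDSetNe _ _ _ hjk] at hvj
              have hjlt : j < k := by
                by_contra hh
                push_neg at hh
                have hge : k + 1 ≤ j := by omega
                have := hvis j hge hlt.1
                rw [this] at hvisj; cases hvisj
              refine ⟨hjlt, hvisj, (pvHasOverlap_iff _ _).2 ⟨v, hvs, hlt.2⟩⟩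
            · rintro ⟨hjk, hvisj, hov⟩
              rcases (pvHasOverlap_iff _ _).1 hov with ⟨v, hva, hvb⟩
              refine ⟨?_, v, hva, (pvIndexMem subs v j).2 ⟨by omega, hvb⟩⟩
              rw [hv1_def, pvGetDSetNe _ _ _ (by omega)]
              exact hvisj
          -- the right-hand side
          rw [pvAlive_succ_unvisited subs visited k hv]
          set A0 := pvAlive subs visited k with hA0_def
          rw [pvLoopA]
          rw [dif_neg (by simp)]
          simp only [List.getLast_concat, List.dropLast_concat]
          rw [pvFoldPair (List.filter (pvHasOverlap s) A0)
            (fun acc sub => (PySem.List.remove? acc sub).getD acc)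
            (fun c sub => PySem.Set.union (PySem.Set.ofList c) sub) A0 s]
          rw [pvRemoveFilter (pvHasOverlap s) A0]
          set ov := A0.filter (pvHasOverlap s) with hov_def
          -- overlap elements vs merged indices
          have hA0mem : ∀ t, t ∈ A0 ↔
              ∃ j, j < k ∧ visited.getD j false = false ∧ t = subs.getD j [] :=
            fun t => pvMemAlive subs visited k t
          have hovjs : ∀ x : Int, (∃ t ∈ ov, x ∈ t) ↔ ∃ j ∈ stc.2, x ∈ subs.getD j [] := by
            intro x
            constructor
            · rintro ⟨t, ht, hx⟩
              rcases List.mem_filter.1 ht with ⟨htA, htp⟩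
              rcases (hA0mem t).1 htA with ⟨j, hjk, hvisj, rfl⟩
              exact ⟨j, (hjs j).2 ⟨hjk, hvisj, htp⟩, hx⟩
            · rintro ⟨j, hj, hx⟩
              rcases (hjs j).1 hj with ⟨hjk, hvisj, hp⟩
              refine ⟨subs.getD j [], List.mem_filter.2 ⟨(hA0mem _).2 ⟨j, hjk, hvisj, rfl⟩, hp⟩, hx⟩
          have hovnil : ov = [] ↔ stc.2 = [] := by
            constructor
            · intro h
              rcases hn : stc.2 with _ | ⟨j, t⟩
              · rfl
              · exfalso
                have hj : j ∈ stc.2 := by rw [hn]; simp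
                rcases (hjs j).1 hj with ⟨hjk, hvisj, hp⟩
                have : subs.getD j [] ∈ ov := List.mem_filter.2
                  ⟨(hA0mem _).2 ⟨j, hjk, hvisj, rfl⟩, hp⟩
                rw [h] at this; cases this
            · intro h
              rcases hn : ov with _ | ⟨t, r⟩
              · rfl
              · exfalso
                have ht : t ∈ ov := by rw [hn]; simp
                rcases List.mem_filter.1 ht with ⟨htA, htp⟩
                rcases (hA0mem t).1 htA with ⟨j, hjk, hvisj, rfl⟩
                have : j ∈ stc.2 := (hjs j).2 ⟨hjk, hvisj, htp⟩
                rw [h] at this; cases this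
          -- the recursive tails agree
          have htail : pvLoopB subs index stc.1 k
              = pvLoopA (A0.filter (fun t => !(pvHasOverlap s t))) := by
            have hlen2 : stc.1.length = subs.length := by
              rw [hinv.1, hv1_def, List.length_set, hlen]
            have hvis2 : ∀ j, k ≤ j → j < subs.length → stc.1.getD j false = true := by
              intro j h1 h2
              rw [hinv.2.2.1 j]
              have : v1.getD j false = true := by
                rcases Nat.eq_or_lt_of_le h1 with h | h
                · rw [← h]; exact hv1k
                · rw [hv1_def, pvGetDSetNe _ _ _ (by omega)]
                  exact hvis j (by omega) h2
              rw [this]; simp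
            have halive2 : pvAlive subs stc.1 k
                = A0.filter (fun t => !(pvHasOverlap s t)) := by
              unfold pvAlive
              rw [hA0_def]
              unfold pvAlive
              rw [List.filter_map]
              rw [List.filter_filter]
              congr 1
              apply List.filter_congr
              intro j hj
              rw [List.mem_range] at hj
              have hvj : stc.1.getD j false
                  = (visited.getD j false || decide (j ∈ stc.2)) := by
                rw [hinv.2.2.1 j, hv1_def, pvGetDSetNe _ _ _ (by omega)]
              rw [hvj]
              cases hvb : visited.getD j false with
              | true => simp
              | false =>
                  simp only [Bool.false_or, Bool.and_true]
                  have hiff : (j ∈ stc.2) ↔ pvHasOverlap s (subs.getD j []) = true := by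
                    rw [hjs j]
                    constructor
                    · rintro ⟨_, _, h⟩; exact h
                    · intro h; exact ⟨hj, hvb, h⟩
                  by_cases hp : pvHasOverlap s (subs.getD j []) = true
                  · simp [hiff, hp, Function.comp]
                  · have hnp : pvHasOverlap s (subs.getD j []) = false := by
                      simpa using hp
                    simp [hiff, hnp, Function.comp]
            rw [← halive2]
            exact ih stc.1 (by omega) hlen2 hvis2
          rw [htail]
          congr 1
          -- the appended entries agree
          by_cases hjs0 : stc.2 = []
          · have hovempty : ov = [] := hovnil.2 hjs0
            simp only [hjs0, if_pos rfl]
            rw [hovempty]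
            simp only [List.foldl_nil]
            exact (PySem.List.sorted_eq_self_of_pairwise s (fun x => x) (Hs k)).symm
          · have hovne : ov ≠ [] := fun h => hjs0 (hovnil.1 h)
            rw [if_neg hjs0]
            rw [PySem.List.sorted_id_eq_sorted_id_iff_perm]
            rw [List.perm_ext_iff_of_nodup
              (pvUpdateFoldNodup stc.2 subs _ (PySem.Set.nodup_ofList s))
              (pvUnionFoldNodup ov hovne s)]
            intro x
            rw [pvUpdateFoldMem, pvUnionFoldMem]
            rw [PySem.Set.mem_ofList]
            rw [hovjs x]

theorem pvAliveFull (l : List (List Int)) :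
    pvAlive l (List.replicate l.length false) l.length = l := by
  unfold pvAlive
  have h1 : List.filter (fun j => !(List.replicate l.length false).getD j false)
      (List.range l.length) = List.range l.length := by
    rw [List.filter_eq_self]
    intro j hj
    rcases Nat.lt_or_ge j l.length with h | h
    · simp [List.getD_eq_getElem?_getD, List.getElem?_replicate, h]
    · simp [List.getD_eq_getElem?_getD, List.getElem?_replicate, Nat.not_lt.2 h]
  rw [h1]
  apply List.ext_getElem
  · simp
  · intro i h1 h2
    simp [List.getD_eq_getElem?_getD, List.getElem?_eq_getElem, h2]

theorem pvNormPairwise (sublists : List (List Int)) (j : Nat) :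
    (((sublists.map (fun sub => PySem.List.sorted (sub.map (fun x => x)) (fun x => x) false))).getD j []).Pairwise
      (fun a b : Int => a ≤ b) := by
  rw [List.getD_eq_getElem?_getD, List.getElem?_map]
  rcases h : sublists[j]? with _ | t
  · simp
  · simp only [Option.map_some, Option.getD_some]
    exact PySem.List.sorted_pairwise _ (fun x => x)

theorem pvCoreEq (sublists : List (List Int)) :
    pvLoopA (sublists.map (fun sub => PySem.List.sorted (sub.map (fun x => x)) (fun x => x) false))
      = pvLoopB (sublists.map (fun sub => PySem.List.sorted (sub.map (fun x => x)) (fun x => x) false))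
          (pvBuildIndex (sublists.map (fun sub => PySem.List.sorted (sub.map (fun x => x)) (fun x => x) false)))
          (List.replicate (sublists.map (fun sub => PySem.List.sorted (sub.map (fun x => x)) (fun x => x) false)).length false)
          (sublists.map (fun sub => PySem.List.sorted (sub.map (fun x => x)) (fun x => x) false)).length := by
  set subs := sublists.map (fun sub => PySem.List.sorted (sub.map (fun x => x)) (fun x => x) false) with hsubs
  have := pvMain subs (pvNormPairwise sublists) subs.length
    (List.replicate subs.length false) (le_refl _) (by simp) (by intro j h1 h2; omega)
  rw [this, pvAliveFull]

-- ===== VERDICT (by name: the statement is the Claim_ definition above) =====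
theorem merge_sublists_spec : Claim_equal_merge_sublists := by
  intro sublists _
  unfold Spec_merge_sublists
  simp only [merge_sublists, merge_sublists_alt]
  rw [pvCoreEq]
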